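-- pv_equiv track=rewrite | github.com/scikit-package/scikit-package-manuscript | hooks/post_gen_project.py | _insert_to_manuscript
-- ===== SOURCE A (Python) =====
-- def _insert_to_manuscript(manuscript_text, insert_text, location_keyword, method):
--     lines = manuscript_text.splitlines()
--     result_lines = []
--     inserted = False
--     if method=="below":
--         for line in lines:
--             result_lines.append(line)
--             if not inserted and line.lstrip().startswith(location_keyword):
--                 result_lines.append(insert_text)
--                 inserted = True
--     elif method=="above":
--         for line in lines:
--             if not inserted and r"\end{document}" in line:
--                 result_lines.append(insert_text)
--                 inserted = True
--             result_lines.append(line)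
--
--     return "\n".join(result_lines)
-- ===== SOURCE B (Python) =====
-- def _insert_to_manuscript(manuscript_text, insert_text, location_keyword, method):
--     lines = manuscript_text.splitlines()
--     if method == "below":
--         idx = next((i for i, l in enumerate(lines)
--                     if l.lstrip().startswith(location_keyword)), None)
--         if idx is None:
--             return "\n".join(lines)
--         return "\n".join(lines[:idx + 1] + [insert_text] + lines[idx + 1:])
--     if method == "above":
--         idx = next((i for i, l in enumerate(lines)
--                     if "\\end{document}" in l), None)
--         if idx is None:
--             return "\n".join(lines)
--         return "\n".join(lines[:idx] + [insert_text] + lines[idx:])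
--     return ""
-- ===== Notes on version B (the rewrite author's own statement) =====
-- stated objective: alternative
-- what changed: B replaces A's single append loop with an inserted flag by first computing the insertion index (first matching line) and then splicing the insert text into the line list with take/drop; no flag state is carried.
import Mathlib
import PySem

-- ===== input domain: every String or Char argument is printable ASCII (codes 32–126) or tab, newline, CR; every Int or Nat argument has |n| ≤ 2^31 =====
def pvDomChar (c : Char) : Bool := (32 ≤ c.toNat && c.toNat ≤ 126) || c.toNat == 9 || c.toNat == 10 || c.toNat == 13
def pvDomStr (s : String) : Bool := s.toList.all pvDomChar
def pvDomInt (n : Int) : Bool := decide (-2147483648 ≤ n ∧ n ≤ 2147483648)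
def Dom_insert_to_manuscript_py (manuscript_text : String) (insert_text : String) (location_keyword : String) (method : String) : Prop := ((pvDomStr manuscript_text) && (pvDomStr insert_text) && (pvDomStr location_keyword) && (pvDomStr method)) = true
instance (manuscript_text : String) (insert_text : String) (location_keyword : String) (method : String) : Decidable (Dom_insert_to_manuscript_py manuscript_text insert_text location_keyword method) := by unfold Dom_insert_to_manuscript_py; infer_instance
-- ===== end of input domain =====

-- B computes the insertion index first and splices with take/drop instead of A's append loop with an inserted flag; same cost, different decomposition.

-- ===== PORT A =====
-- A's "below" for-loop: state (result_lines, inserted)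
def pvA_below (location_keyword insert_text : String) :
    List String → List String × Bool → List String × Bool
  | [], st => st
  | line :: rest, (res, inserted) =>
      let res := res ++ [line]
      if !inserted && PySem.Str.startswith (PySem.Str.lstrip line) location_keyword then
        pvA_below location_keyword insert_text rest (res ++ [insert_text], true)
      else
        pvA_below location_keyword insert_text rest (res, inserted)

-- A's "above" for-loop
def pvA_above (insert_text : String) :
    List String → List String × Bool → List String × Bool
  | [], st => st
  | line :: rest, (res, inserted) =>
      if !inserted && PySem.Str.isIn "\\end{document}" line then
        pvA_above insert_text rest (res ++ [insert_text, line], true)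
      else
        pvA_above insert_text rest (res ++ [line], inserted)

def insert_to_manuscript_py (manuscript_text : String) (insert_text : String) (location_keyword : String) (method : String) : String :=
  let lines := PySem.Str.splitlines manuscript_text
  let result_lines : List String :=
    if method == "below" then (pvA_below location_keyword insert_text lines ([], false)).1
    else if method == "above" then (pvA_above insert_text lines ([], false)).1
    else []
  PySem.Str.join "\n" result_lines

-- ===== PORT B =====
def insert_to_manuscript_py_alt (manuscript_text : String) (insert_text : String) (location_keyword : String) (method : String) : String :=
  let lines := PySem.Str.splitlines manuscript_text
  if method == "below" then
    match lines.findIdx? (fun l => PySem.Str.startswith (PySem.Str.lstrip l) location_keyword) with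
    | none => PySem.Str.join "\n" lines
    | some i => PySem.Str.join "\n" (lines.take (i + 1) ++ [insert_text] ++ lines.drop (i + 1))
  else if method == "above" then
    match lines.findIdx? (fun l => PySem.Str.isIn "\\end{document}" l) with
    | none => PySem.Str.join "\n" lines
    | some i => PySem.Str.join "\n" (lines.take i ++ [insert_text] ++ lines.drop i)
  else ""

-- ===== PRECONDITION & SPEC =====
def Spec_insert_to_manuscript_py (manuscript_text : String) (insert_text : String) (location_keyword : String) (method : String) (out : String) : Prop := out = insert_to_manuscript_py_alt manuscript_text insert_text location_keyword method
instance (manuscript_text : String) (insert_text : String) (location_keyword : String) (method : String) (out : String) : Decidable (Spec_insert_to_manuscript_py manuscript_text insert_text location_keyword method out) := by unfold Spec_insert_to_manuscript_py; infer_instance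

-- ===== CLAIM (what is proved, stated in full; the proofs are below) =====
def Claim_equal_insert_to_manuscript_py : Prop := ∀ (manuscript_text : String) (insert_text : String) (location_keyword : String) (method : String), Dom_insert_to_manuscript_py manuscript_text insert_text location_keyword method → Spec_insert_to_manuscript_py manuscript_text insert_text location_keyword method (insert_to_manuscript_py manuscript_text insert_text location_keyword method)

-- ===== LEMMAS AND PROOFS =====

-- once inserted, A's loops just append the remaining lines
theorem pvA_below_true (kw it : String) (lines res : List String) :
    pvA_below kw it lines (res, true) = (res ++ lines, true) := by
  induction lines generalizing res with
  | nil => simp [pvA_below]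
  | cons l rest ih => simp [pvA_below, ih]

theorem pvA_above_true (it : String) (lines res : List String) :
    pvA_above it lines (res, true) = (res ++ lines, true) := by
  induction lines generalizing res with
  | nil => simp [pvA_above]
  | cons l rest ih => simp [pvA_above, ih]

-- A's "below" loop = find-index-and-splice
theorem pvA_below_spec (kw it : String) (lines res : List String) :
    (pvA_below kw it lines (res, false)).1 =
      res ++ (match lines.findIdx? (fun l => PySem.Str.startswith (PySem.Str.lstrip l) kw) with
              | none => lines
              | some i => lines.take (i + 1) ++ [it] ++ lines.drop (i + 1)) := by
  induction lines generalizing res with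
  | nil => simp [pvA_below]
  | cons l rest ih =>
    by_cases h : PySem.Str.startswith (PySem.Str.lstrip l) kw = true
    · simp only [PySem.Str.startswith_eq, PySem.Str.toList_lstrip] at h
      simp [pvA_below, h, pvA_below_true, List.findIdx?_cons]
    · simp only [pvA_below, h, Bool.not_false, Bool.and_false, if_neg, List.findIdx?_cons,
        Bool.false_eq_true, not_false_eq_true, Bool.and_true]
      rw [ih]
      cases hf : rest.findIdx? (fun l => PySem.Str.startswith (PySem.Str.lstrip l) kw) <;>
        simp [h, hf, List.take_succ_cons, List.drop_succ_cons]

-- A's "above" loop = find-index-and-splice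
theorem pvA_above_spec (it : String) (lines res : List String) :
    (pvA_above it lines (res, false)).1 =
      res ++ (match lines.findIdx? (fun l => PySem.Str.isIn "\\end{document}" l) with
              | none => lines
              | some i => lines.take i ++ [it] ++ lines.drop i) := by
  induction lines generalizing res with
  | nil => simp [pvA_above]
  | cons l rest ih =>
    by_cases h : PySem.Str.isIn "\\end{document}" l = true
    · simp only [PySem.Str.isIn_eq] at h
      rw [show "\\end{document}".toList = ['\\', 'e', 'n', 'd', '{', 'd', 'o', 'c', 'u', 'm', 'e', 'n', 't', '}'] from rfl] at h
      simp [pvA_above, h, pvA_above_true, List.findIdx?_cons]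
    · simp only [pvA_above, h, Bool.not_false, Bool.and_false, if_neg, List.findIdx?_cons,
        Bool.false_eq_true, not_false_eq_true, Bool.and_true]
      rw [ih]
      cases hf : rest.findIdx? (fun l => PySem.Str.isIn "\\end{document}" l) <;>
        simp [h, hf, List.take_succ_cons, List.drop_succ_cons]

-- ===== VERDICT (by name: the statement is the Claim_ definition above) =====
theorem insert_to_manuscript_py_spec : Claim_equal_insert_to_manuscript_py := by
  intro m it kw meth _
  unfold Spec_insert_to_manuscript_py insert_to_manuscript_py insert_to_manuscript_py_alt
  by_cases hb : meth == "below"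
  · simp only [hb, if_pos]
    rw [pvA_below_spec]
    cases hf : (PySem.Str.splitlines m).findIdx?
        (fun l => PySem.Str.startswith (PySem.Str.lstrip l) kw) <;> simp [hf]
  · by_cases ha : meth == "above"
    · simp only [hb, ha, if_pos, if_neg, Bool.false_eq_true, not_false_eq_true]
      rw [pvA_above_spec]
      cases hf : (PySem.Str.splitlines m).findIdx?
          (fun l => PySem.Str.isIn "\\end{document}" l) <;> simp [hf]
    · simp [hb, ha, PySem.Str.join]
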